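-- pv_equiv track=rewrite | github.com/Avani201/textract-farmdata-pipeline | lambda_function.py | merge_positional_data
-- ===== SOURCE A (Python) =====
-- def merge_positional_data(base_data, continuation_data):
--     """
--     FIXED: Merge continuation data into base data, preserving dashes and exact positions.
--     This fills empty positions (marked with '-') with continuation data in order.
--     """
--     if not continuation_data:
--         return base_data
--
--     # Ensure base_data has exactly 5 elements
--     while len(base_data) < 5:
--         base_data.append('-')
--     base_data = base_data[:5]
--
--     result = base_data[:]
--
--     # Fill empty positions (marked with '-') with continuation data
--     continuation_index = 0
--     for i in range(5):
--         # Only fill if current position is empty (dash) and we have continuation data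
--         if (result[i] == '-' and
--             continuation_index < len(continuation_data)):
--
--             # Get the next piece of continuation data
--             cont_value = continuation_data[continuation_index]
--
--             # Only use non-dash values to fill empty positions
--             if cont_value != '-':
--                 result[i] = cont_value
--
--             continuation_index += 1
--
--     return result
-- ===== SOURCE B (Python) =====
-- def merge_positional_data(base_data, continuation_data):
--     if not continuation_data:
--         return base_data
--     while len(base_data) < 5:
--         base_data.append('-')
--     base = base_data[:5]
--
--     def cell(i):
--         b = base[i]
--         if b != '-':
--             return b
--         k = base[:i].count('-')  # rank of this dash among the dashes of base
--         if k < len(continuation_data) and continuation_data[k] != '-':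
--             return continuation_data[k]
--         return '-'
--
--     return [cell(i) for i in range(5)]
-- ===== Notes on version B (the rewrite author's own statement) =====
-- stated objective: alternative
-- what changed: Replaces A's stateful scan (mutating result with a running continuation cursor) by a per-position closed form: each output cell is computed independently from the dash-rank of its position (count of dashes in the base prefix), so there is no mutation and no sequential state.
import Mathlib
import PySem

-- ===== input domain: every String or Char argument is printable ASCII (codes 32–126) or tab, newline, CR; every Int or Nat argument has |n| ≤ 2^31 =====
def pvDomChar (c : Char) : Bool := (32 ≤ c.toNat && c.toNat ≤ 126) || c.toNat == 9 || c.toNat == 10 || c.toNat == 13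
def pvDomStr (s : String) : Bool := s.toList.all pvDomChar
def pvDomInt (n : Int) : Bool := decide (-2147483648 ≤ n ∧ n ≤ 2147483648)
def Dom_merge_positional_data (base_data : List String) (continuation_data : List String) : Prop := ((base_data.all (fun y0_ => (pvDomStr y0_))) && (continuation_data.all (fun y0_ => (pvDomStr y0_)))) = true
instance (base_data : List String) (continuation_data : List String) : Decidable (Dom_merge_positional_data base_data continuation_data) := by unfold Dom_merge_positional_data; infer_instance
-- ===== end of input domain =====

-- B computes each of the 5 output cells independently by a per-position closed form
-- (the dash-rank of the position indexes continuation_data) instead of A's stateful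
-- scan with a running cursor; both pad base_data in place via append, and the
-- equivalence proved is about the return value.


-- ===== PORT A =====
-- while len(base_data) < 5: base_data.append('-') — the loop body runs at most 5
-- times, so it is ported with a structural fuel counter of 5 (exact: fuel never runs out)
def pvPad5Go : Nat → List String → List String
  | 0, xs => xs
  | k + 1, xs => if xs.length < 5 then pvPad5Go k (xs ++ ["-"]) else xs

def pvPad5 (xs : List String) : List String := pvPad5Go 5 xs

-- the body of A's for-loop: state = (result, continuation_index)
def pvStepA (continuation_data : List String) (st : List String × Nat) (i : Int) : List String × Nat :=
  if PySem.List.pyGetD st.1 i "" = "-" ∧ st.2 < continuation_data.length then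
    let cont := PySem.List.pyGetD continuation_data (Int.ofNat st.2) ""
    (if cont ≠ "-" then st.1.set i.toNat cont else st.1, st.2 + 1)
  else st

def merge_positional_data (base_data : List String) (continuation_data : List String) : List String :=
  if continuation_data = [] then base_data
  else
    let base := (pvPad5 base_data).take 5
    let result := base
    ((PySem.List.pyRange 0 5 1).foldl (pvStepA continuation_data) (result, 0)).1

-- ===== PORT B =====
-- cell(i) of Source B: the value of output position i, from the dash-rank of i in base
def pvCell (base cont : List String) (i : Nat) : String :=
  if base.getD i "" ≠ "-" then base.getD i ""
  else if (base.take i).count "-" < cont.length ∧ cont.getD ((base.take i).count "-") "" ≠ "-"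
    then cont.getD ((base.take i).count "-") "" else "-"

def merge_positional_data_alt (base_data : List String) (continuation_data : List String) : List String :=
  if continuation_data = [] then base_data
  else
    let base := (pvPad5 base_data).take 5
    (List.range 5).map (pvCell base continuation_data)

-- ===== PRECONDITION & SPEC =====
def Spec_merge_positional_data (base_data : List String) (continuation_data : List String) (out : List String) : Prop := out = merge_positional_data_alt base_data continuation_data
instance (base_data : List String) (continuation_data : List String) (out : List String) : Decidable (Spec_merge_positional_data base_data continuation_data out) := by unfold Spec_merge_positional_data; infer_instance

-- ===== CLAIM =====
def Claim_equal_merge_positional_data : Prop := ∀ (base_data : List String) (continuation_data : List String), Dom_merge_positional_data base_data continuation_data → Spec_merge_positional_data base_data continuation_data (merge_positional_data base_data continuation_data)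

-- ===== LEMMAS AND PROOFS =====
lemma pvPad5Go_len (k : Nat) : ∀ (xs : List String), 5 ≤ xs.length + k → 5 ≤ (pvPad5Go k xs).length := by
  induction k with
  | zero => intro xs h; simpa using h
  | succ k ih =>
    intro xs h
    rw [pvPad5Go]
    by_cases hl : xs.length < 5
    · rw [if_pos hl]
      refine ih (xs ++ ["-"]) ?_
      simp
      omega
    · rw [if_neg hl]; omega

lemma pvPad5_len (xs : List String) : 5 ≤ (pvPad5 xs).length :=
  pvPad5Go_len 5 xs (by omega)

-- result list after processing indices 0..n-1 of A's loop
def pvOut (base cont : List String) (n : Nat) : List String :=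
  (List.range base.length).map (fun j => if j < n then pvCell base cont j else base.getD j "")

lemma pvOut_zero (base cont : List String) : pvOut base cont 0 = base := by
  apply List.ext_getElem
  · simp [pvOut]
  · intro j hj hj'
    simp [pvOut, List.getElem?_eq_getElem hj']

lemma pvOut_length (base cont : List String) (n : Nat) :
    (pvOut base cont n).length = base.length := by simp [pvOut]

lemma pvOut_succ_set (base cont : List String) (n : Nat) :
    pvOut base cont (n + 1) = (pvOut base cont n).set n (pvCell base cont n) := by
  apply List.ext_getElem
  · simp [pvOut]
  · intro j hj hj'
    have hjlen : j < base.length := by simpa [pvOut] using hj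
    by_cases hjn : j = n
    · subst hjn
      have hset : j < (pvOut base cont j).length := by simpa [pvOut_length]
      have hset : j < ((pvOut base cont j).set j (pvCell base cont j)).length := by
        simpa [pvOut_length]
      rw [List.getElem_set_self hset]
      simp [pvOut]
    · rw [List.getElem_set_ne (by omega)]
      simp only [pvOut, List.getElem_map, List.getElem_range]
      by_cases hlt : j < n
      · simp [hlt, Nat.lt_succ_of_lt hlt]
      · have h1 : ¬ j < n + 1 := by omega
        simp [hlt, h1]

lemma pvOut_succ_eq (base cont : List String) (n : Nat) (hnlt : n < base.length)
    (h : pvCell base cont n = base.getD n "") :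
    pvOut base cont (n + 1) = pvOut base cont n := by
  rw [pvOut_succ_set, h]
  apply List.ext_getElem
  · simp [pvOut]
  · intro j hj hj'
    have hjlen : j < base.length := by simpa [pvOut_length] using hj'
    by_cases hjn : j = n
    · subst hjn
      have hset : j < ((pvOut base cont j).set j (base.getD j "")).length := by
        simpa [pvOut_length]
      rw [List.getElem_set_self hset]
      simp [pvOut, hjlen]
    · rw [List.getElem_set_ne (by omega)]

lemma pvOut_getD_self (base cont : List String) (n : Nat) (hnlt : n < base.length) :
    (pvOut base cont n).getD n "" = base.getD n "" := by
  have hl : n < (pvOut base cont n).length := by simpa [pvOut_length]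
  rw [List.getD_eq_getElem?_getD, List.getElem?_eq_getElem hl]
  simp [pvOut]

lemma loopA_char (base cont : List String) (n : Nat) (hn : n ≤ base.length) :
    ((List.range n).map Int.ofNat).foldl (pvStepA cont) (base, 0)
      = (pvOut base cont n, min ((base.take n).count "-") cont.length) := by
  induction n with
  | zero => simp [pvOut_zero]
  | succ n ih =>
    have hnlt : n < base.length := hn
    rw [List.range_succ, List.map_append, List.foldl_append, ih (Nat.le_of_lt hnlt)]
    simp only [List.map_cons, List.map_nil, List.foldl_cons, List.foldl_nil]
    have hgetn : PySem.List.pyGetD (pvOut base cont n) (Int.ofNat n) "" = base.getD n "" := by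
      simpa [PySem.List.pyGetD_natCast] using pvOut_getD_self base cont n hnlt
    have hcount : (base.take (n + 1)).count "-"
        = (base.take n).count "-" + (if base.getD n "" = "-" then 1 else 0) := by
      rw [List.take_add_one, List.count_append, List.getElem?_eq_getElem hnlt]
      rw [List.getD_eq_getElem base "" hnlt]
      by_cases hdx : base[n] = "-" <;> simp [hdx]
    set cnt := (base.take n).count "-" with hcnt
    by_cases hd : base.getD n "" = "-"
    · -- position n is a dash in base
      have hcell0 : pvCell base cont n
          = if cnt < cont.length ∧ cont.getD cnt "" ≠ "-" then cont.getD cnt "" else "-" := by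
        rw [pvCell, hd, if_neg (by simp), ← hcnt]
      by_cases hlo : cnt < cont.length
      · -- cursor below the continuation length: a value is consumed
        have hmin : min cnt cont.length = cnt := by omega
        have hguard : PySem.List.pyGetD (pvOut base cont n) (Int.ofNat n) "" = "-" ∧
            min cnt cont.length < cont.length := ⟨by rw [hgetn]; exact hd, by omega⟩
        rw [pvStepA, if_pos hguard]
        show (if PySem.List.pyGetD cont (Int.ofNat (min cnt cont.length)) "" ≠ "-" then
                (pvOut base cont n).set ((Int.ofNat n).toNat)
                  (PySem.List.pyGetD cont (Int.ofNat (min cnt cont.length)) "")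
              else pvOut base cont n, min cnt cont.length + 1)
            = (pvOut base cont (n + 1), min ((base.take (n + 1)).count "-") cont.length)
        have hcv : PySem.List.pyGetD cont (Int.ofNat (min cnt cont.length)) ""
            = cont.getD cnt "" := by
          rw [hmin]; simp [PySem.List.pyGetD_natCast]
        rw [hcv, hcount, if_pos hd]
        by_cases hcv2 : cont.getD cnt "" = "-"
        · have hcell' : pvCell base cont n = base.getD n "" := by
            rw [hcell0, if_neg (fun h => h.2 hcv2)]; exact hd.symm
          rw [hcv2, if_neg (by simp), pvOut_succ_eq base cont n hnlt hcell']
          exact Prod.ext rfl (by omega)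
        · have hcell' : pvCell base cont n = cont.getD cnt "" := by
            rw [hcell0, if_pos ⟨hlo, hcv2⟩]
          rw [if_pos hcv2]
          refine Prod.ext ?_ (by omega)
          show (pvOut base cont n).set n (cont.getD cnt "") = pvOut base cont (n + 1)
          rw [pvOut_succ_set, hcell']
      · -- cursor saturated at the continuation length: nothing happens
        have hguard : ¬ (PySem.List.pyGetD (pvOut base cont n) (Int.ofNat n) "" = "-" ∧
            min cnt cont.length < cont.length) := by
          intro h
          have h2 : min cnt cont.length < cont.length := h.2
          omega
        rw [pvStepA, if_neg hguard]
        have hcell' : pvCell base cont n = base.getD n "" := by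
          rw [hcell0, if_neg (fun h => hlo h.1)]; exact hd.symm
        rw [pvOut_succ_eq base cont n hnlt hcell', hcount, if_pos hd]
        exact Prod.ext rfl (by omega)
    · -- position n is not a dash: untouched on both sides
      have hguard : ¬ (PySem.List.pyGetD (pvOut base cont n) (Int.ofNat n) "" = "-" ∧
          min cnt cont.length < cont.length) := by
        intro h
        have h1 : PySem.List.pyGetD (pvOut base cont n) (Int.ofNat n) "" = "-" := h.1
        exact hd (hgetn ▸ h1)
      rw [pvStepA, if_neg hguard]
      have hcell' : pvCell base cont n = base.getD n "" := by
        rw [pvCell, if_pos hd]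
      rw [pvOut_succ_eq base cont n hnlt hcell', hcount, if_neg hd]
      exact Prod.ext rfl (by omega)

-- ===== VERDICT =====
theorem merge_positional_data_spec : Claim_equal_merge_positional_data := by
  intro base_data continuation_data _
  unfold Spec_merge_positional_data merge_positional_data merge_positional_data_alt
  by_cases hc : continuation_data = []
  · simp [hc]
  · simp only [hc, ite_false]
    set base := (pvPad5 base_data).take 5 with hb
    have hlen : base.length = 5 := by
      rw [hb, List.length_take]
      have := pvPad5_len base_data
      omega
    have hrange : PySem.List.pyRange 0 5 1 = (List.range 5).map Int.ofNat := by decide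
    rw [hrange, loopA_char base continuation_data 5 (by omega)]
    simp only [pvOut, hlen]
    exact List.map_congr_left (fun j hj => by simp [List.mem_range.mp hj])
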